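-- pv_equiv track=rewrite | github.com/luckstech/prog2 | fichas/2_complexidade/complexidade.py | prog5_h
-- ===== SOURCE A (Python) =====
-- def prog5_h(l1, l2):
--     soma = 0
--     for x in l1:            #O(n)
--         if x % 2 == 0:
--             soma += 1
--         else:
--             for y in l2:    #O(m)
--                 soma += y
--     return soma
-- ===== SOURCE B (Python) =====
-- def prog5_h(l1, l2):
--     evens = sum(1 for x in l1 if x % 2 == 0)
--     odds = len(l1) - evens
--     return evens + (odds * sum(l2) if odds > 0 else 0)
-- ===== Notes on version B (the rewrite author's own statement) =====
-- stated objective: alternative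
-- what changed: Replaces the nested loop over l2 (run once per odd element) with a single pass counting evens/odds plus one multiplication odds*sum(l2), guarded so sum(l2) is not computed when there is no odd element.
import Mathlib
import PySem

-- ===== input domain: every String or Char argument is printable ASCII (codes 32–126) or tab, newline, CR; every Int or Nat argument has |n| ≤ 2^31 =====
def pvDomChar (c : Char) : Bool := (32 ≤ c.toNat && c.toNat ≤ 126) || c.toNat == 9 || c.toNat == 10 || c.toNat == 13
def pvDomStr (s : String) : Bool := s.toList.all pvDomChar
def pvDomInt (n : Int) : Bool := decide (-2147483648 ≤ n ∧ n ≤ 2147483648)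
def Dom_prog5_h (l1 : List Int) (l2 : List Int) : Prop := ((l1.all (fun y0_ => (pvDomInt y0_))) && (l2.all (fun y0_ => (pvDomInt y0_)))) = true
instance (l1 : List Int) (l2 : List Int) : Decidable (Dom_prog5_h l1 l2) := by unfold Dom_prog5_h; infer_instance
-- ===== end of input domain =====

-- B replaces A's nested loop over l2 with one counting pass and a multiplication odds*sum(l2).

-- ===== PORT A =====
-- soma accumulated over l1; odd branch runs the inner loop over l2
def prog5_h (l1 : List Int) (l2 : List Int) : Int :=
  l1.foldl (fun soma x =>
    if PySem.Int.mod x 2 = 0 then soma + 1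
    else l2.foldl (fun s y => s + y) soma) 0

-- ===== PORT B =====
def prog5_h_alt (l1 : List Int) (l2 : List Int) : Int :=
  let evens : Int := ((l1.filter (fun x => PySem.Int.mod x 2 = 0)).length : Int)
  let odds : Int := (l1.length : Int) - evens
  evens + (if odds > 0 then odds * (l2.foldl (fun s y => s + y) 0) else 0)

-- ===== PRECONDITION & SPEC =====
def Spec_prog5_h (l1 : List Int) (l2 : List Int) (out : Int) : Prop := out = prog5_h_alt l1 l2
instance (l1 : List Int) (l2 : List Int) (out : Int) : Decidable (Spec_prog5_h l1 l2 out) := by unfold Spec_prog5_h; infer_instance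

-- ===== CLAIM (what is proved, stated in full; the proofs are below) =====
def Claim_equal_prog5_h : Prop := ∀ (l1 : List Int) (l2 : List Int), Dom_prog5_h l1 l2 → Spec_prog5_h l1 l2 (prog5_h l1 l2)

-- ===== LEMMAS AND PROOFS =====

theorem pv_shift {α : Type} (g : α → Int) (l : List α) (a : Int) :
    l.foldl (fun s x => s + g x) a = a + l.foldl (fun s x => s + g x) 0 := by
  induction l generalizing a with
  | nil => simp
  | cons x xs ih => simp only [List.foldl]; rw [ih (a + g x), ih (0 + g x)]; ring

theorem pv_body (l2 : List Int) :
    (fun (soma x : Int) =>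
      if PySem.Int.mod x 2 = 0 then soma + 1
      else l2.foldl (fun s y => s + y) soma)
    = (fun soma x => soma +
        (if PySem.Int.mod x 2 = 0 then 1 else l2.foldl (fun s y => s + y) 0)) := by
  funext soma x
  by_cases h : PySem.Int.mod x 2 = 0
  · rw [if_pos h, if_pos h]
  · rw [if_neg h, if_neg h]
    have := pv_shift (fun y : Int => y) l2 soma
    simpa using this

theorem pv_main (l1 l2 : List Int) :
    prog5_h l1 l2 =
      ((l1.filter (fun x => PySem.Int.mod x 2 = 0)).length : Int)
      + ((l1.length : Int) - ((l1.filter (fun x => PySem.Int.mod x 2 = 0)).length : Int))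
          * (l2.foldl (fun s y => s + y) 0) := by
  unfold prog5_h
  rw [pv_body l2]
  induction l1 with
  | nil => simp
  | cons x xs ih =>
    simp only [List.foldl, List.filter_cons, List.length_cons]
    rw [pv_shift _ xs, ih]
    by_cases h : PySem.Int.mod x 2 = 0
    · simp only [h, decide_true]
      push_cast [List.length_cons]; ring
    · simp only [h, decide_false]
      push_cast [List.length_cons]; ring

-- ===== VERDICT (by name: the statement is the Claim_ definition above) =====
theorem prog5_h_spec : Claim_equal_prog5_h := by
  intro l1 l2 _
  unfold Spec_prog5_h prog5_h_alt
  rw [pv_main]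
  by_cases h : ((l1.length : Int) - ((l1.filter (fun x => PySem.Int.mod x 2 = 0)).length : Int)) > 0
  · simp only [if_pos h]
  · simp only [if_neg h]
    have hle : ((l1.filter (fun x => PySem.Int.mod x 2 = 0)).length : Int) ≤ (l1.length : Int) := by
      exact_mod_cast List.length_filter_le _ _
    have h0 : ((l1.length : Int) - ((l1.filter (fun x => PySem.Int.mod x 2 = 0)).length : Int)) = 0 := by omega
    rw [h0]; ring
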